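-- pv_equiv track=rewrite | github.com/drchaiya/FFT-IA | fft_ia/fft_ia/core.py | butterfly_pairs
-- ===== SOURCE A (Python) =====
-- def butterfly_pairs(seq_len, stage):
--     """
--     Fixed radix-2 butterfly connectivity (Decimation-in-Time style)
--     stage ∈ [0, log2(N)-1], stride = 2^stage
--     """
--     stride = 1 << stage
--     pairs = []
--     for i in range(0, seq_len, stride * 2):
--         for j in range(stride):
--             a = i + j
--             b = i + j + stride
--             if b < seq_len:
--                 pairs.append((a, b))
--     return pairs
-- ===== SOURCE B (Python) =====
-- def butterfly_pairs(seq_len, stage):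
--     # Single pass over all indices instead of nested block/offset loops:
--     # index a starts a butterfly exactly when it lies in the lower half of
--     # its 2*stride block, i.e. a % (2*stride) < stride.
--     stride = 1 << stage
--     period = stride * 2
--     pairs = []
--     for a in range(seq_len):
--         if a % period < stride and a + stride < seq_len:
--             pairs.append((a, a + stride))
--     return pairs
-- ===== Notes on version B (the rewrite author's own statement) =====
-- stated objective: alternative
-- what changed: Replaced A's nested block/offset loops (outer index stepping by 2*stride, inner offset loop) by a single pass over all indices a in range(seq_len) that emits (a, a+stride) exactly when a lies in the lower half of its 2*stride block (a % (2*stride) < stride) and a+stride < seq_len.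
-- outside the precondition, e.g. on butterfly_pairs(8, -1): A raises ValueError, B raises ValueError
import Mathlib
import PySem

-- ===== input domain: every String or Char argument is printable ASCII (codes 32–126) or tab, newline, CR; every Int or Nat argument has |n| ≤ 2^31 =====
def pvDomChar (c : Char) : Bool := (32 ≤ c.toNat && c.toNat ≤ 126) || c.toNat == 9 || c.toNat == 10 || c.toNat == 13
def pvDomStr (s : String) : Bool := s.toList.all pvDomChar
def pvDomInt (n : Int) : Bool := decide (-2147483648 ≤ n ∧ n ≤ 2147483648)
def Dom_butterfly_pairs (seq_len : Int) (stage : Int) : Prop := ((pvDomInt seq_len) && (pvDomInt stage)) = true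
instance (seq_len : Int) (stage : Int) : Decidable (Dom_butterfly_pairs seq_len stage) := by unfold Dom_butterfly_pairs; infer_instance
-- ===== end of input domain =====

-- B replaces A's nested block/offset loops by one pass over all indices a,
-- emitting (a, a+stride) when a lands in the lower half of its 2*stride block
-- (a % (2*stride) < stride): same pairs in the same order, a different decomposition.

-- ===== PORT A =====
def butterfly_pairs (seq_len : Int) (stage : Int) : List (Int × Int) :=
  -- '1 << stage'; exact for 0 ≤ stage (Pre_; Python raises ValueError for negative shift)
  let stride : Int := 1 <<< stage.toNat
  (PySem.List.pyRange 0 seq_len (stride * 2)).foldl (fun pairs i =>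
    (PySem.List.pyRange 0 stride 1).foldl (fun pairs j =>
      let a := i + j
      let b := i + j + stride
      if b < seq_len then pairs ++ [(a, b)] else pairs) pairs) []

-- ===== PORT B =====
def butterfly_pairs_alt (seq_len : Int) (stage : Int) : List (Int × Int) :=
  -- '1 << stage'; exact for 0 ≤ stage (Pre_)
  let stride : Int := 1 <<< stage.toNat
  let period : Int := stride * 2
  (PySem.List.pyRange 0 seq_len 1).foldl (fun pairs a =>
    if PySem.Int.mod a period < stride ∧ a + stride < seq_len then
      pairs ++ [(a, a + stride)]
    else pairs) []

-- ===== PRECONDITION & SPEC =====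
-- Python's '1 << stage' raises ValueError for negative stage; those inputs are excluded.
def Pre_butterfly_pairs (seq_len : Int) (stage : Int) : Prop := 0 ≤ stage
instance (seq_len : Int) (stage : Int) : Decidable (Pre_butterfly_pairs seq_len stage) := by
  unfold Pre_butterfly_pairs; infer_instance
def pvWitness_butterfly_pairs : Int × Int := (8, 1)

def Spec_butterfly_pairs (seq_len : Int) (stage : Int) (out : List (Int × Int)) : Prop :=
  out = butterfly_pairs_alt seq_len stage
instance (seq_len : Int) (stage : Int) (out : List (Int × Int)) : Decidable (Spec_butterfly_pairs seq_len stage out) := by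
  unfold Spec_butterfly_pairs; infer_instance

-- ===== CLAIM (what is proved, stated in full; the proofs are below) =====
def Claim_equal_butterfly_pairs : Prop := ∀ (seq_len : Int) (stage : Int), Dom_butterfly_pairs seq_len stage → Pre_butterfly_pairs seq_len stage → Spec_butterfly_pairs seq_len stage (butterfly_pairs seq_len stage)

-- ===== LEMMAS AND PROOFS =====
lemma pv_filter_range_lt (N : Nat) (c : Int) :
    (List.range N).filter (fun k : Nat => decide ((k : Int) < c)) = List.range (min N c.toNat) := by
  induction N with
  | zero => simp
  | succ N ih =>
    rw [List.range_succ, List.filter_append, ih]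
    by_cases h : (N : Int) < c
    · have h1 : min N c.toNat = N := by omega
      have h2 : min (N + 1) c.toNat = N + 1 := by omega
      simp [h, h1, List.range_succ]
    · have h2 : min (N + 1) c.toNat = min N c.toNat := by omega
      simp [h, h2]

lemma pv_block (s n i : Int) (hs : 0 < s) (him : i % (s * 2) = 0) (hin : i < n) :
    ((PySem.List.pyRange 0 s 1).filter (fun j => decide (i + j + s < n))).map
        (fun j => (i + j, i + j + s))
      = ((PySem.List.pyRange i (min (i + s * 2) n) 1).filter
            (fun a => decide (PySem.Int.mod a (s * 2) < s ∧ a + s < n))).map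
          (fun a => (a, a + s)) := by
  rw [PySem.List.pyRange_one 0 s, PySem.List.pyRange_one i (min (i + s * 2) n)]
  rw [List.filter_map, List.filter_map, List.map_map, List.map_map]
  simp only [Function.comp_def, zero_add, sub_zero]
  set t : Nat := (min (i + s * 2) n - i).toNat with ht
  have ht2 : (t : Int) ≤ s * 2 := by omega
  have e1 : ∀ k ∈ List.range s.toNat,
      (decide (i + (k : Int) + s < n)) = decide ((k : Int) < n - i - s) := by
    intro k _
    exact decide_eq_decide.mpr (by omega)
  have e2 : ∀ k ∈ List.range t,
      (decide (PySem.Int.mod (i + (k : Int)) (s * 2) < s ∧ i + (k : Int) + s < n))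
        = decide ((k : Int) < min s (n - i - s)) := by
    intro k hk
    have hk' : (k : Int) < s * 2 := by
      have := List.mem_range.mp hk; omega
    have hmod : PySem.Int.mod (i + (k : Int)) (s * 2) = (k : Int) := by
      rw [PySem.Int.mod_eq_emod_of_pos (by omega)]
      have h1 : (i + (k : Int)) % (s * 2) = (k : Int) % (s * 2) := by
        rw [Int.add_emod, him]
        simp [Int.emod_emod_of_dvd]
      rw [h1, Int.emod_eq_of_lt (by omega) hk']
    rw [hmod]
    exact decide_eq_decide.mpr (by omega)
  rw [List.filter_congr e1, List.filter_congr e2, pv_filter_range_lt, pv_filter_range_lt]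
  have : min s.toNat (n - i - s).toNat = min t (min s (n - i - s)).toNat := by omega
  rw [this]

lemma pv_pyRange_pos_nil (a b s : Int) (hs : 0 < s) (h : b ≤ a) :
    PySem.List.pyRange a b s = [] := by
  rw [PySem.List.pyRange_of_pos a b hs, if_neg (by omega)]
  simp

lemma pv_pyRange_pos_cons (a b s : Int) (hs : 0 < s) (h : a < b) :
    PySem.List.pyRange a b s = a :: PySem.List.pyRange (a + s) b s := by
  rw [PySem.List.pyRange_of_pos a b hs, PySem.List.pyRange_of_pos (a + s) b hs,
    if_pos h]
  have hstep : (b - a + s - 1) / s = (b - a - 1) / s + 1 := by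
    have := Int.add_mul_ediv_right (b - a - 1) 1 (by omega : s ≠ 0)
    simp at this
    rw [show b - a + s - 1 = b - a - 1 + s by ring, this]
  by_cases h2 : a + s < b
  · have htail : (b - (a + s) + s - 1) / s = (b - a - 1) / s := by ring_nf
    rw [if_pos h2, htail]
    have hnn : 0 ≤ (b - a - 1) / s := Int.ediv_nonneg (by omega) (by omega)
    have hcount : ((b - a + s - 1) / s).toNat = ((b - a - 1) / s).toNat + 1 := by omega
    rw [hcount, List.range_succ_eq_map, List.map_cons, List.map_map]
    refine List.cons_eq_cons.mpr ⟨by push_cast; ring, ?_⟩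
    refine List.map_congr_left fun k _ => ?_
    simp only [Function.comp_apply]
    push_cast; ring
  · have hone : (b - a - 1) / s = 0 :=
      Int.ediv_eq_zero_of_lt (by omega) (by omega)
    rw [if_neg h2]
    have : ((b - a + s - 1) / s).toNat = 1 := by omega
    rw [this]
    simp

lemma pv_main (s n : Int) (hs : 0 < s) : ∀ (N : Nat) (i : Int), (n - i).toNat ≤ N → 0 ≤ i → i % (s * 2) = 0 →
    (PySem.List.pyRange i n (s * 2)).flatMap
        (fun i => ((PySem.List.pyRange 0 s 1).filter (fun j => decide (i + j + s < n))).map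
          (fun j => (i + j, i + j + s)))
      = ((PySem.List.pyRange i n 1).filter
            (fun a => decide (PySem.Int.mod a (s * 2) < s ∧ a + s < n))).map
          (fun a => (a, a + s)) := by
  intro N
  induction N with
  | zero =>
    intro i hN hi him
    rw [pv_pyRange_pos_nil i n (s * 2) (by omega) (by omega),
      PySem.List.pyRange_one_eq_nil (by omega : n ≤ i)]
    simp
  | succ N ih =>
    intro i hN hi him
    by_cases hin : i < n
    · rw [pv_pyRange_pos_cons i n (s * 2) (by omega) hin, List.flatMap_cons]
      rw [PySem.List.pyRange_one_append i (min (i + s * 2) n) n (by omega) (by omega),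
        List.filter_append, List.map_append]
      congr 1
      · exact pv_block s n i hs him hin
      · by_cases h2 : i + s * 2 ≤ n
        · have hm : min (i + s * 2) n = i + s * 2 := by omega
          rw [hm]
          refine ih (i + s * 2) (by omega) (by omega) ?_
          calc (i + s * 2) % (s * 2) = (i + s * 2 * 1) % (s * 2) := by ring_nf
            _ = i % (s * 2) := Int.add_mul_emod_self_left i (s * 2) 1
            _ = 0 := him
        · have hm : min (i + s * 2) n = n := by omega
          rw [hm, pv_pyRange_pos_nil (i + s * 2) n (s * 2) (by omega) (by omega),
            PySem.List.pyRange_one_eq_nil (le_refl n)]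
          simp
    · rw [pv_pyRange_pos_nil i n (s * 2) (by omega) (by omega),
        PySem.List.pyRange_one_eq_nil (by omega : n ≤ i)]
      simp

-- ===== VERDICT (by name: the statement is the Claim_ definition above) =====
theorem butterfly_pairs_spec : Claim_equal_butterfly_pairs := by
  intro seq_len stage _ hpre
  unfold Spec_butterfly_pairs butterfly_pairs butterfly_pairs_alt
  have hs : 0 < (1 : Int) <<< stage.toNat := by rw [Int.shiftLeft_eq]; positivity
  simp only [PySem.List.foldl_append_ite, List.nil_append]
  rw [PySem.List.foldl_append_eq_flatMap, List.nil_append]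
  exact pv_main _ seq_len hs seq_len.toNat 0 (by omega) le_rfl (by simp)
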